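-- pv_equiv track=rewrite | github.com/boehmrya/cs1_projects | hw4/hw4c.py | parse
-- ===== SOURCE A (Python) =====
-- def parse(s):
--     wordList = []
--     alphabet = "abcdefghijklmnopqrstuvwxyz"
--     start = 0
--     current = 0
--     count = 0
--
--     while current < len(s):
--         if s[current] in alphabet:
--             count += 1
--         else:
--             if count >= 4:
--                 word = s[start:current]
--                 wordList.append(word.strip().lower())
--             count = 0
--             start = current
--         current += 1
--
--     return wordList
-- ===== SOURCE B (Python) =====
-- def parse(s):
--     lower = "abcdefghijklmnopqrstuvwxyz"
--     boundaries = [i for i, c in enumerate(s) if c not in lower]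
--     result = []
--     start = 0
--     for b in boundaries:
--         seg = s[start:b]
--         if sum(1 for c in seg if c in lower) >= 4:
--             result.append(seg.strip().lower())
--         start = b
--     return result
-- ===== Notes on version B (the rewrite author's own statement) =====
-- stated objective: alternative
-- what changed: Replaces A's fused single-pass state machine (mutable start/count updated per character) with a two-pass index-first shape: first collect all delimiter positions, then cut the string at consecutive boundaries and keep each segment whose lowercase-letter count is at least 4.
import Mathlib
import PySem

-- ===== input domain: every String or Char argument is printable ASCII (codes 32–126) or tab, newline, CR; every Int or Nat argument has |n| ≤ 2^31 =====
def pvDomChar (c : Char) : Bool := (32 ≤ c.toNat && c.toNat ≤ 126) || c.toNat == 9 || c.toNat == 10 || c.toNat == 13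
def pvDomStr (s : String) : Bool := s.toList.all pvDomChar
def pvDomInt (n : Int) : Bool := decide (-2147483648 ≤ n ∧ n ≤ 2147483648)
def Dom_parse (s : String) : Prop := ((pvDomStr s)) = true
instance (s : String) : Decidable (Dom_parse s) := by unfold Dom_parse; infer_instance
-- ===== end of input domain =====

-- B replaces A's fused one-pass scanner (mutable start/count state machine) by an index-first
-- two-pass shape: collect delimiter positions, then cut and test each segment; same values, alternative decomposition.

-- shared helpers: the alphabet constant and the '.strip().lower()' both Pythons apply to a kept segment
def pvLowerAlpha : List Char := "abcdefghijklmnopqrstuvwxyz".toList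

def pvMkWord (seg : List Char) : String :=
  String.ofList (PySem.Chars.lower (PySem.Chars.strip seg))

-- ===== PORT A =====
-- A's while loop; `current` is the index of the head of `rest` (= full.drop current), state (start, count, wordList).
-- `s[current] in alphabet` for the single char s[current] is exactly char membership in the alphabet.
def parseGo (full : List Char) : List Char → Nat → Nat → Nat → List String → List String
  | [], _, _, _, wordList => wordList
  | c :: rest, current, start, count, wordList =>
    if c ∈ pvLowerAlpha then
      parseGo full rest (current + 1) start (count + 1) wordList
    else
      parseGo full rest (current + 1) current 0
        (if 4 ≤ count then
            wordList ++ [pvMkWord (PySem.List.slice full (some (start : Int)) (some (current : Int)))]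
          else wordList)

def parse (s : String) : List String :=
  parseGo s.toList s.toList 0 0 0 []

-- ===== PORT B =====
-- Source B: boundaries = [i for i, c in enumerate(s) if c not in lower]; then fold over boundaries with (result, start).
def parseStepB (cs : List Char) (st : List String × Int) (b : Int) : List String × Int :=
  let seg := PySem.List.slice cs (some st.2) (some b)
  if 4 ≤ seg.countP (fun c => decide (c ∈ pvLowerAlpha)) then
    (st.1 ++ [pvMkWord seg], b)
  else (st.1, b)

def parse_alt (s : String) : List String :=
  let cs := s.toList
  let boundaries :=
    ((PySem.List.enumerate cs 0).filter (fun p => !(decide (p.2 ∈ pvLowerAlpha)))).map (·.1)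
  (boundaries.foldl (parseStepB cs) ([], 0)).1

-- ===== PRECONDITION & SPEC =====
def Spec_parse (s : String) (out : List String) : Prop := out = parse_alt s
instance (s : String) (out : List String) : Decidable (Spec_parse s out) := by unfold Spec_parse; infer_instance

-- ===== CLAIM (what is proved, stated in full; the proofs are below) =====
def Claim_equal_parse : Prop := ∀ (s : String), Dom_parse s → Spec_parse s (parse s)

-- ===== LEMMAS AND PROOFS =====

lemma pv_take_succ_drop (cs : List Char) (start current : Nat) (c : Char) (rest' : List Char)
    (h : cs.drop current = c :: rest') (hs : start ≤ current) :
    (cs.drop start).take (current + 1 - start) = (cs.drop start).take (current - start) ++ [c] := by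
  have hk : current + 1 - start = (current - start) + 1 := by omega
  have hget : (cs.drop start)[current - start]? = some c := by
    rw [List.getElem?_drop]
    have : cs[current]? = some c := by
      have h0 : (cs.drop current)[0]? = cs[current + 0]? := List.getElem?_drop
      rw [h] at h0
      simpa using h0.symm
    simpa [Nat.add_sub_cancel' hs] using this
  rw [hk, List.take_add_one, hget]
  rfl

lemma pv_main (cs : List Char) (rest : List Char) :
    ∀ (current start : Nat) (acc : List String), rest = cs.drop current → start ≤ current →
    parseGo cs rest current start
        (((cs.drop start).take (current - start)).countP (fun c => decide (c ∈ pvLowerAlpha))) acc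
      = ((((PySem.List.enumerate rest (current : Int)).filter
            (fun p => !(decide (p.2 ∈ pvLowerAlpha)))).map (·.1)).foldl
          (parseStepB cs) (acc, (start : Int))).1 := by
  induction rest with
  | nil => intro current start acc _ _; simp [parseGo, PySem.List.enumerate]
  | cons c rest' ih =>
    intro current start acc hrest hs
    have hrest' : rest' = cs.drop (current + 1) := by
      have := congrArg List.tail hrest.symm
      simpa [List.tail_drop] using this.symm
    rw [PySem.List.enumerate_cons]
    by_cases hc : c ∈ pvLowerAlpha
    · -- lowercase letter: count += 1, boundary list unchanged
      have hcount : ((cs.drop start).take (current + 1 - start)).countP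
            (fun c => decide (c ∈ pvLowerAlpha))
          = ((cs.drop start).take (current - start)).countP
            (fun c => decide (c ∈ pvLowerAlpha)) + 1 := by
        rw [pv_take_succ_drop cs start current c rest' hrest.symm hs]
        simp [List.countP_append, hc]
      have := ih (current + 1) start acc hrest' (by omega)
      rw [hcount] at this
      simpa [parseGo, hc, List.filter_cons, push_cast] using this
    · -- delimiter: B's fold consumes boundary `current`, with the same segment and the same count
      have hseg : PySem.List.slice cs (some (start : Int)) (some (current : Int))
          = (cs.drop start).take (current - start) := PySem.List.slice_natCast cs start current
      have hcount0 : ((cs.drop current).take (current + 1 - current)).countP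
            (fun c => decide (c ∈ pvLowerAlpha)) = 0 := by
        rw [pv_take_succ_drop cs current current c rest' hrest.symm (le_refl _)]
        simp [hc]
      have hih := ih (current + 1) current
        (if 4 ≤ ((cs.drop start).take (current - start)).countP (fun c => decide (c ∈ pvLowerAlpha))
          then acc ++ [pvMkWord (PySem.List.slice cs (some (start : Int)) (some (current : Int)))]
          else acc) hrest' (by omega)
      rw [hcount0] at hih
      rw [List.filter_cons]
      simp only [hc, decide_false, Bool.not_false, if_true, List.map_cons]
      rw [List.foldl_cons]
      have hstep : parseStepB cs (acc, (start : Int)) (current : Int)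
          = ((if 4 ≤ ((cs.drop start).take (current - start)).countP
                  (fun c => decide (c ∈ pvLowerAlpha))
              then acc ++ [pvMkWord (PySem.List.slice cs (some (start : Int)) (some (current : Int)))]
              else acc), (current : Int)) := by
        simp only [parseStepB, hseg]
        split_ifs <;> simp
      rw [hstep]
      simp only [parseGo, hc, if_false]
      simpa [push_cast] using hih

-- ===== VERDICT (by name: the statement is the Claim_ definition above) =====
theorem parse_spec : Claim_equal_parse := by
  intro s _
  unfold Spec_parse parse parse_alt
  have := pv_main s.toList s.toList 0 0 [] (by simp) (le_refl _)
  simpa using this
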